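-- pv_equiv track=rewrite | github.com/SDET-Krunal/Python-Interview-Programs | String_Programs/ReplaceFirstAndLastCharFromString.py | replace_first_and_last_char_with_given_char
-- ===== SOURCE A (Python) =====
-- def replace_first_and_last_char_with_given_char(string_value, char_to_be_replace):
--     res = ""
--
--     for i in range(len(string_value)):
--         if i == 0:
--             res = char_to_be_replace
--         elif i == len(string_value) - 1:
--             res += char_to_be_replace
--         else:
--             res += string_value[i]
--
--     return res
-- ===== SOURCE B (Python) =====
-- def replace_first_and_last_char_with_given_char(string_value, char_to_be_replace):
--     l = list(string_value)
--     if not l: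
--         return ""
--     l[0] = char_to_be_replace
--     l[-1] = char_to_be_replace
--     return "".join(l)
-- ===== Notes on version B (the rewrite author's own statement) =====
-- stated objective: simpler
-- what changed: Replaces the per-index loop with its three-way branch (building the result by repeated string concatenation) by two direct positional writes into a char list (l[0] and l[-1]) followed by one join.
import Mathlib
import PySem

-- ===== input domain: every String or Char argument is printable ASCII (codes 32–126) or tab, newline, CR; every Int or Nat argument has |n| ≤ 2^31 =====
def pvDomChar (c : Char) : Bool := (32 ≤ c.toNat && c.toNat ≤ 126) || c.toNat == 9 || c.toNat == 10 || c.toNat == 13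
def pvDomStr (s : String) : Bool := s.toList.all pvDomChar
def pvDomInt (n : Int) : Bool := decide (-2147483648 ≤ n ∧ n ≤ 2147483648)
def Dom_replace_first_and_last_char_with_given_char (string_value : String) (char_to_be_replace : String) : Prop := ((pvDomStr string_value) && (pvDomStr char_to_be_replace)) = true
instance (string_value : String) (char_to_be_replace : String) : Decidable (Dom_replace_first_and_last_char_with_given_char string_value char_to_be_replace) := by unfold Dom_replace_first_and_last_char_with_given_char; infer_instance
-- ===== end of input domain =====

-- B replaces A's indexed loop with its three-way branch by two direct positional
-- writes on a char list followed by a single join (objective: simpler).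

-- ===== PORT A =====
-- A's loop over range(len(s)) with the three branches, accumulating `res`
-- (strings handled on the List Char side, as PySem prescribes).
def replace_first_and_last_char_with_given_char (string_value : String) (char_to_be_replace : String) : String :=
  let sv := string_value.toList
  let ch := char_to_be_replace.toList
  let res := (PySem.List.pyRange 0 (PySem.List.len sv) 1).foldl
    (fun res i =>
      if i = 0 then ch
      else if i = PySem.List.len sv - 1 then res ++ ch
      else res ++ (PySem.List.pyGet? sv i).elim [] (fun x => [x]))
    []
  String.ofList res

-- ===== PORT B =====
-- B: l = list(s); if not l: return ""; l[0] = c; l[-1] = c; return "".join(l)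
def replace_first_and_last_char_with_given_char_alt (string_value : String) (char_to_be_replace : String) : String :=
  let l : List (List Char) := string_value.toList.map (fun c => [c])
  if l = [] then ""
  else
    let l := l.set 0 char_to_be_replace.toList
    let l := l.set (l.length - 1) char_to_be_replace.toList
    String.ofList l.flatten

-- ===== PRECONDITION & SPEC =====
def Spec_replace_first_and_last_char_with_given_char (string_value : String) (char_to_be_replace : String) (out : String) : Prop := out = replace_first_and_last_char_with_given_char_alt string_value char_to_be_replace
instance (string_value : String) (char_to_be_replace : String) (out : String) : Decidable (Spec_replace_first_and_last_char_with_given_char string_value char_to_be_replace out) := by unfold Spec_replace_first_and_last_char_with_given_char; infer_instance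

-- ===== CLAIM (what is proved, stated in full; the proofs are below) =====
def Claim_equal_replace_first_and_last_char_with_given_char : Prop := ∀ (string_value : String) (char_to_be_replace : String), Dom_replace_first_and_last_char_with_given_char string_value char_to_be_replace → Spec_replace_first_and_last_char_with_given_char string_value char_to_be_replace (replace_first_and_last_char_with_given_char string_value char_to_be_replace)

-- ===== LEMMAS AND PROOFS =====

-- setting the last slot of xs ++ [x]
theorem pv_set_append_last {α : Type} (xs : List α) (x y : α) :
    (xs ++ [x]).set xs.length y = xs ++ [y] := by
  induction xs with
  | nil => rfl
  | cons a t ih => simp [ih]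

-- closed form of A's loop for a string a :: (mid ++ [b]) (length ≥ 2)
theorem pv_A_closed (a b : Char) (mid ch : List Char) :
    (PySem.List.pyRange 0 (PySem.List.len (a :: (mid ++ [b]))) 1).foldl
      (fun res i =>
        if i = 0 then ch
        else if i = PySem.List.len (a :: (mid ++ [b])) - 1 then res ++ ch
        else res ++ (PySem.List.pyGet? (a :: (mid ++ [b])) i).elim [] (fun x => [x]))
      [] = ch ++ mid ++ ch := by
  have hlen : PySem.List.len (a :: (mid ++ [b])) = (mid.length : Int) + 2 := by
    simp [PySem.List.len]; omega
  rw [hlen]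
  -- peel off i = 0
  rw [PySem.List.pyRange_one_cons (by omega : (0:Int) < (mid.length : Int) + 2)]
  simp only [List.foldl_cons, if_true, zero_add]
  -- split off the last index
  have hsplit : PySem.List.pyRange 1 ((mid.length : Int) + 2) 1
      = PySem.List.pyRange 1 ((mid.length : Int) + 1) 1 ++ [(mid.length : Int) + 1] := by
    have := PySem.List.pyRange_one_succ_right (a := 1) (b := (mid.length : Int) + 1) (by omega)
    simpa using this
  have harith : (mid.length : Int) + 2 - 1 = (mid.length : Int) + 1 := by ring
  rw [harith, hsplit, List.foldl_append]
  -- the middle fold appends the middle characters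
  have hmid : ∀ (acc : List Char), ∀ i ∈ PySem.List.pyRange 1 ((mid.length : Int) + 1) 1,
      (fun res i =>
        if i = 0 then ch
        else if i = (mid.length : Int) + 1 then res ++ ch
        else res ++ (PySem.List.pyGet? (a :: (mid ++ [b])) i).elim [] (fun x => [x])) acc i
      = (fun res i => res ++ [PySem.List.pyGetD (a :: (mid ++ [b])) i ' ']) acc i := by
    intro acc i hi
    rw [PySem.List.mem_pyRange_one] at hi
    have h0 : ¬ (i = 0) := by omega
    have h1 : ¬ (i = (mid.length : Int) + 1) := by omega
    have hget := PySem.List.pyGet?_eq_some_getElem (xs := a :: (mid ++ [b])) (i := i)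
      (by omega) (by simp; omega)
    have hgetD := PySem.List.pyGetD_eq_getElem (xs := a :: (mid ++ [b])) (i := i) (d := ' ')
      (by omega) (by simp; omega)
    simp only [h0, h1, if_false, hget, hgetD, Option.elim_some]
  rw [PySem.List.foldl_congr_mem _ _ _ _ hmid]
  rw [PySem.List.foldl_append_eq_flatMap]
  -- the flatMap of singletons over the middle indices is exactly mid
  have hdl : (a :: (mid ++ [b])).dropLast = a :: mid := by
    rw [show a :: (mid ++ [b]) = (a :: mid) ++ [b] from rfl, List.dropLast_concat]
  have hlen' : PySem.List.len ((a :: (mid ++ [b])).dropLast) = (mid.length : Int) + 1 := by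
    rw [hdl]; simp [PySem.List.len]
  have hsame : ∀ i ∈ PySem.List.pyRange 1 ((mid.length : Int) + 1) 1,
      [PySem.List.pyGetD (a :: (mid ++ [b])) i ' ']
      = [PySem.List.pyGetD ((a :: (mid ++ [b])).dropLast) i ' '] := by
    intro i hi
    rw [PySem.List.mem_pyRange_one] at hi
    have h1 := PySem.List.pyGetD_eq_getElem (xs := a :: (mid ++ [b])) (i := i) (d := ' ')
      (by omega) (by simp; omega)
    have h2 := PySem.List.pyGetD_eq_getElem (xs := (a :: (mid ++ [b])).dropLast) (i := i) (d := ' ')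
      (by omega) (by simp; omega)
    rw [h1, h2]
    congr 1
    simp [List.getElem_dropLast]
  rw [List.flatMap_congr hsame]
  have hsingle : List.flatMap (fun i => [PySem.List.pyGetD ((a :: (mid ++ [b])).dropLast) i ' '])
      (PySem.List.pyRange 1 ((mid.length : Int) + 1) 1)
      = List.map (fun i => PySem.List.pyGetD ((a :: (mid ++ [b])).dropLast) i ' ')
        (PySem.List.pyRange 1 ((mid.length : Int) + 1) 1) := by
    induction PySem.List.pyRange 1 ((mid.length : Int) + 1) 1 with
    | nil => rfl
    | cons x t ih => simp [List.flatMap_cons, ih]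
  rw [hsingle]
  have hmap := PySem.List.map_pyGetD_pyRange (xs := (a :: (mid ++ [b])).dropLast) (d := ' ')
      (a := 1) (by omega)
  rw [hlen'] at hmap
  rw [hmap, hdl]
  -- the final index appends ch
  simp only [List.foldl_cons, List.foldl_nil]
  rw [if_neg (by omega : ¬ ((mid.length : Int) + 1 = 0))]
  simp

-- closed form of B's list for a string a :: (mid ++ [b]) (length ≥ 2)
theorem pv_B_closed (a b : Char) (mid ch : List Char) :
    ((((a :: (mid ++ [b])).map (fun c => [c])).set 0 ch).set
        ((((a :: (mid ++ [b])).map (fun c => [c])).set 0 ch).length - 1) ch).flatten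
      = ch ++ mid ++ ch := by
  have h1 : ((a :: (mid ++ [b])).map (fun c : Char => [c])).set 0 ch
      = (ch :: mid.map (fun c : Char => [c])) ++ [[b]] := by
    simp
  rw [h1]
  have hlen : ((ch :: mid.map (fun c : Char => [c])) ++ [[b]]).length - 1
      = (ch :: mid.map (fun c : Char => [c])).length := by simp
  rw [hlen, pv_set_append_last]
  have hflat : (mid.map (fun c : Char => [c])).flatten = mid := by
    induction mid with
    | nil => rfl
    | cons x t ih => simp [ih]
  simp [hflat]

-- ===== VERDICT (by name: the statement is the Claim_ definition above) =====
theorem replace_first_and_last_char_with_given_char_spec : Claim_equal_replace_first_and_last_char_with_given_char := by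
  intro s c _
  unfold Spec_replace_first_and_last_char_with_given_char
  unfold replace_first_and_last_char_with_given_char
  unfold replace_first_and_last_char_with_given_char_alt
  dsimp only
  rcases hsv : s.toList with _ | ⟨a, rest⟩
  · simp [PySem.List.pyRange_one_eq_nil, PySem.List.len]
  · rcases List.eq_nil_or_concat rest with hr | ⟨mid, b, hr⟩
    · subst hr
      have h01 : PySem.List.pyRange 0 (PySem.List.len [a]) 1 = [0] := by
        have : PySem.List.len [a] = 1 := by simp [PySem.List.len]
        rw [this]; decide
      rw [h01]
      simp
    · subst hr
      simp only [List.concat_eq_append]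
      rw [pv_A_closed a b mid c.toList]
      have hne : ((a :: (mid ++ [b])).map (fun c : Char => [c])) ≠ [] := by simp
      rw [if_neg hne, pv_B_closed a b mid c.toList]
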